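-- pv_equiv track=rewrite | github.com/gumayusi1111/510580 | factor/src/data_loader.py | get_required_columns_for_factors
-- ===== SOURCE A (Python) =====
-- from typing import Optional, Union, List
--
-- def get_required_columns_for_factors(factor_names: List[str]) -> List[str]:
--     """
--     获取因子列表所需的所有列
--     Args:
--         factor_names: 因子名称列表
--     Returns:
--         所需列名列表
--     """
--     # 基础列总是需要的
--     required = ['ts_code', 'trade_date']
--
--     # 根据因子类型添加所需列
--     for factor_name in factor_names:
--         if factor_name.upper() in ['SMA', 'EMA', 'WMA', 'MACD', 'RSI', 'ROC', 'MOM']: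
--             required.extend(['hfq_open', 'hfq_high', 'hfq_low', 'hfq_close'])
--         elif factor_name.upper() in ['VMA', 'VOLUME_RATIO', 'OBV']:
--             required.extend(['vol', 'amount'])
--         elif factor_name.upper() in ['BOLL', 'ATR', 'HV']:
--             required.extend(['hfq_open', 'hfq_high', 'hfq_low', 'hfq_close'])
--
--     return list(set(required))  # 去重
-- ===== SOURCE B (Python) =====
-- from typing import Optional, Union, List
--
-- PRICE_FACTORS = {'SMA', 'EMA', 'WMA', 'MACD', 'RSI', 'ROC', 'MOM', 'BOLL', 'ATR', 'HV'}
-- VOLUME_FACTORS = {'VMA', 'VOLUME_RATIO', 'OBV'}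
-- CATEGORY_COLUMNS = {
--     'price': ['hfq_open', 'hfq_high', 'hfq_low', 'hfq_close'],
--     'volume': ['vol', 'amount'],
-- }
--
-- def _category(name):
--     u = name.upper()
--     if u in PRICE_FACTORS:
--         return 'price'
--     if u in VOLUME_FACTORS:
--         return 'volume'
--     return None
--
-- def get_required_columns_for_factors(factor_names: List[str]) -> List[str]:
--     # stage 1: collect the distinct data categories, in order of first appearance
--     cats = []
--     for f in factor_names:
--         c = _category(f)
--         if c is not None and c not in cats:
--             cats.append(c)
--     # stage 2: expand each category to its columns exactly once
--     cols = ['ts_code', 'trade_date']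
--     for c in cats:
--         cols += CATEGORY_COLUMNS[c]
--     return list(set(cols))
-- ===== Notes on version B (the rewrite author's own statement) =====
-- stated objective: alternative
-- what changed: Instead of extending a column list inside the if/elif chain for every factor, B first normalises the factors into at most two distinct data categories ('price', merging the two branches that add the same hfq_* columns, and 'volume') in order of first appearance, then expands each category to its columns exactly once; set-dedup at the end makes this equal to A.
import Mathlib
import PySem

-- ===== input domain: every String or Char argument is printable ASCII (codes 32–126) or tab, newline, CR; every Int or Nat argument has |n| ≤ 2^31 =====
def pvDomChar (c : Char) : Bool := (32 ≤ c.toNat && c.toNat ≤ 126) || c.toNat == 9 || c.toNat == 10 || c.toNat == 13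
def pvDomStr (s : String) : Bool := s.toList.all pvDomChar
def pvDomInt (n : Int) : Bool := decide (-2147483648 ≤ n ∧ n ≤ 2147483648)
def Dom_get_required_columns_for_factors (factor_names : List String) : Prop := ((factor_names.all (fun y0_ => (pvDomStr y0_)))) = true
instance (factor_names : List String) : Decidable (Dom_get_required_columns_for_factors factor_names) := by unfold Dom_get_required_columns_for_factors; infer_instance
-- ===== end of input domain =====

-- B replaces A's per-factor column accumulation by a two-stage pass: collect the distinct
-- data categories first (merging the two branches that add the same hfq_* columns), then
-- expand each category to its columns once;no speed claim.
-- ===== PORT A =====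
def get_required_columns_for_factors (factor_names : List String) : List String :=
  let required : List String := ["ts_code", "trade_date"]
  let required := factor_names.foldl (fun req factor_name =>
    if (["SMA", "EMA", "WMA", "MACD", "RSI", "ROC", "MOM"].contains (PySem.Str.upper factor_name)) then
      req ++ ["hfq_open", "hfq_high", "hfq_low", "hfq_close"]
    else if (["VMA", "VOLUME_RATIO", "OBV"].contains (PySem.Str.upper factor_name)) then
      req ++ ["vol", "amount"]
    else if (["BOLL", "ATR", "HV"].contains (PySem.Str.upper factor_name)) then
      req ++ ["hfq_open", "hfq_high", "hfq_low", "hfq_close"]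
    else req) required
  PySem.Set.ofList required

-- ===== PORT B =====
def PRICE_FACTORS : PySem.Set String :=
  PySem.Set.ofList ["SMA", "EMA", "WMA", "MACD", "RSI", "ROC", "MOM", "BOLL", "ATR", "HV"]
def VOLUME_FACTORS : PySem.Set String :=
  PySem.Set.ofList ["VMA", "VOLUME_RATIO", "OBV"]
-- CATEGORY_COLUMNS dict: only ever looked up at its two literal keys
def categoryColumns (c : String) : List String :=
  if c = "price" then ["hfq_open", "hfq_high", "hfq_low", "hfq_close"] else ["vol", "amount"]
-- helper _category
def pvCategory (name : String) : Option String :=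
  let u := PySem.Str.upper name
  if PRICE_FACTORS.contains u then some "price"
  else if VOLUME_FACTORS.contains u then some "volume"
  else none

def get_required_columns_for_factors_alt (factor_names : List String) : List String :=
  -- stage 1: distinct categories in order of first appearance
  let cats := factor_names.foldl (fun cats f =>
    match pvCategory f with
    | some c => if cats.contains c then cats else cats ++ [c]
    | none => cats) ([] : List String)
  -- stage 2: expand each category once
  let cols := cats.foldl (fun cols c => cols ++ categoryColumns c) ["ts_code", "trade_date"]
  PySem.Set.ofList cols

-- ===== PRECONDITION & SPEC =====
def Spec_get_required_columns_for_factors (factor_names : List String) (out : List String) : Prop := out = get_required_columns_for_factors_alt factor_names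
instance (factor_names : List String) (out : List String) : Decidable (Spec_get_required_columns_for_factors factor_names out) := by unfold Spec_get_required_columns_for_factors; infer_instance

-- ===== CLAIM (what is proved, stated in full; the proofs are below) =====
def Claim_equal_get_required_columns_for_factors : Prop := ∀ (factor_names : List String), Dom_get_required_columns_for_factors factor_names → Spec_get_required_columns_for_factors factor_names (get_required_columns_for_factors factor_names)

-- ===== LEMMAS AND PROOFS =====

lemma PRICE_eq : PRICE_FACTORS = ["SMA", "EMA", "WMA", "MACD", "RSI", "ROC", "MOM", "BOLL", "ATR", "HV"] := by decide
lemma VOLUME_eq : VOLUME_FACTORS = ["VMA", "VOLUME_RATIO", "OBV"] := by decide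

-- updating a set with elements it already has is a no-op
lemma update_of_subset (s : PySem.Set String) (ys : List String)
    (h : ∀ x ∈ ys, x ∈ s) : PySem.Set.update s ys = s := by
  rw [PySem.Set.update_eq_append_filter]
  have hnil : (PySem.Set.ofList ys).filter (fun y => !(PySem.Set.contains s y)) = [] := by
    rw [List.filter_eq_nil_iff]
    intro y hy
    simpa using h y ((PySem.Set.mem_ofList _ _).mp hy)
  rw [hnil, List.append_nil]

-- A's per-factor branch chain appends exactly the columns of B's category (or nothing)
lemma step_cols (f : String) :
    (if (["SMA", "EMA", "WMA", "MACD", "RSI", "ROC", "MOM"].contains (PySem.Str.upper f)) then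
      ["hfq_open", "hfq_high", "hfq_low", "hfq_close"]
    else if (["VMA", "VOLUME_RATIO", "OBV"].contains (PySem.Str.upper f)) then
      ["vol", "amount"]
    else if (["BOLL", "ATR", "HV"].contains (PySem.Str.upper f)) then
      ["hfq_open", "hfq_high", "hfq_low", "hfq_close"]
    else ([] : List String))
    = (match pvCategory f with
       | some c => categoryColumns c
       | none => ([] : List String)) := by
  unfold pvCategory
  rw [PRICE_eq, VOLUME_eq]
  generalize PySem.Str.upper f = u
  by_cases h1 : u = "SMA"
  · subst h1; decide
  by_cases h2 : u = "EMA"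
  · subst h2; decide
  by_cases h3 : u = "WMA"
  · subst h3; decide
  by_cases h4 : u = "MACD"
  · subst h4; decide
  by_cases h5 : u = "RSI"
  · subst h5; decide
  by_cases h6 : u = "ROC"
  · subst h6; decide
  by_cases h7 : u = "MOM"
  · subst h7; decide
  by_cases h8 : u = "BOLL"
  · subst h8; decide
  by_cases h9 : u = "ATR"
  · subst h9; decide
  by_cases h10 : u = "HV"
  · subst h10; decide
  by_cases h11 : u = "VMA"
  · subst h11; decide
  by_cases h12 : u = "VOLUME_RATIO"
  · subst h12; decide
  by_cases h13 : u = "OBV"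
  · subst h13; decide
  simp [h1, h2, h3, h4, h5, h6, h7, h8, h9, h10, h11, h12, h13]

-- B's stage-2 expansion as a flatMap
lemma stage2_flatMap (cats acc : List String) :
    cats.foldl (fun cols c => cols ++ categoryColumns c) acc = acc ++ cats.flatMap categoryColumns :=
  PySem.List.foldl_append_eq_flatMap _ _ _

-- main invariant: A's running column list and B's running category list denote the same set
lemma main_inv (l : List String) (req cats : List String)
    (h : PySem.Set.ofList req
        = PySem.Set.ofList (["ts_code", "trade_date"] ++ cats.flatMap categoryColumns)) :
    PySem.Set.ofList (l.foldl (fun req factor_name =>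
      if (["SMA", "EMA", "WMA", "MACD", "RSI", "ROC", "MOM"].contains (PySem.Str.upper factor_name)) then
        req ++ ["hfq_open", "hfq_high", "hfq_low", "hfq_close"]
      else if (["VMA", "VOLUME_RATIO", "OBV"].contains (PySem.Str.upper factor_name)) then
        req ++ ["vol", "amount"]
      else if (["BOLL", "ATR", "HV"].contains (PySem.Str.upper factor_name)) then
        req ++ ["hfq_open", "hfq_high", "hfq_low", "hfq_close"]
      else req) req)
    = PySem.Set.ofList (["ts_code", "trade_date"] ++
        (l.foldl (fun cats f =>
          match pvCategory f with
          | some c => if cats.contains c then cats else cats ++ [c]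
          | none => cats) cats).flatMap categoryColumns) := by
  induction l generalizing req cats with
  | nil => simpa using h
  | cons f t ih =>
      simp only [List.foldl_cons]
      have hstep : (if (["SMA", "EMA", "WMA", "MACD", "RSI", "ROC", "MOM"].contains (PySem.Str.upper f)) then
          req ++ ["hfq_open", "hfq_high", "hfq_low", "hfq_close"]
        else if (["VMA", "VOLUME_RATIO", "OBV"].contains (PySem.Str.upper f)) then
          req ++ ["vol", "amount"]
        else if (["BOLL", "ATR", "HV"].contains (PySem.Str.upper f)) then
          req ++ ["hfq_open", "hfq_high", "hfq_low", "hfq_close"]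
        else req)
        = req ++ (match pvCategory f with
                  | some c => categoryColumns c
                  | none => ([] : List String)) := by
        have := step_cols f
        split_ifs at this ⊢ <;> simp [← this]
      rw [hstep]
      match hc : pvCategory f with
      | none =>
          simp only [List.append_nil]
          exact ih req cats h
      | some c =>
          simp only [hc]
          by_cases hm : cats.contains c
          · rw [if_pos hm]
            apply ih _ cats
            rw [PySem.Set.ofList_append, h]
            refine update_of_subset _ _ (fun x hx => ?_)
            rw [PySem.Set.mem_ofList]
            have hcmem : c ∈ cats := by simpa using hm
            exact List.mem_append_right _ (List.mem_flatMap.mpr ⟨c, hcmem, hx⟩)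
          · rw [if_neg hm]
            apply ih _ (cats ++ [c])
            rw [PySem.Set.ofList_append, h]
            have he : ["ts_code", "trade_date"] ++ (cats ++ [c]).flatMap categoryColumns
                = (["ts_code", "trade_date"] ++ cats.flatMap categoryColumns) ++ categoryColumns c := by
              simp
            rw [he]
            simp only [PySem.Set.ofList_append]

-- ===== VERDICT (by name: the statement is the Claim_ definition above) =====
theorem get_required_columns_for_factors_spec : Claim_equal_get_required_columns_for_factors := by
  intro factor_names _
  unfold Spec_get_required_columns_for_factors
  unfold get_required_columns_for_factors get_required_columns_for_factors_alt
  simp only [stage2_flatMap]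
  exact main_inv factor_names ["ts_code", "trade_date"] [] rfl
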